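-- pv_equiv track=rewrite | github.com/Techrifat97/BasicPythonCodeSamples-Teaching- | basicPython/MethodsFunction/functiontest.py | old_macDonald
-- ===== SOURCE A (Python) =====
-- def old_macDonald(val):
--     name = ''
--     it = len(val)
--     for  i in range(0, it):
--         if i == 0:
--             name = name + val[i].capitalize()
--             continue
--         if i == 3:
--             name = name + val[i].capitalize()
--             continue
--         name = name + val[i]
--     return name
-- ===== SOURCE B (Python) =====
-- def old_macDonald(val):
--     chars = list(val)
--     for i in (0, 3):
--         if i < len(chars):
--             chars[i] = chars[i].capitalize()
--     return ''.join(chars)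
-- ===== Notes on version B (the rewrite author's own statement) =====
-- stated objective: faster
-- what changed: Instead of scanning every index with i==0/i==3 branches while rebuilding the string by repeated quadratic concatenation, B copies the string into a list once, mutates only positions 0 and 3 (guarded for short strings), and joins.
import Mathlib
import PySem

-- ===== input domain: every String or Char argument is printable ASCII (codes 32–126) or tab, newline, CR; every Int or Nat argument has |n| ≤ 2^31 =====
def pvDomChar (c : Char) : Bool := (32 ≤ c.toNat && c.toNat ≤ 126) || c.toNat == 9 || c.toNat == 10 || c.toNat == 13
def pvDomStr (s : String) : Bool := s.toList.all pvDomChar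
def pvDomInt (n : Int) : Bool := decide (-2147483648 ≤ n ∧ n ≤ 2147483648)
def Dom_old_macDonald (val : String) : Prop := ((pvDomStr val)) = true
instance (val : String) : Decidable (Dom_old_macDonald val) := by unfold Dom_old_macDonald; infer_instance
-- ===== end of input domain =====

-- B replaces A's full index scan (with i==0/i==3 branches and repeated concatenation)
-- by a one-shot copy to a char list with targeted capitalization of positions 0 and 3.


-- ===== PORT A =====
-- loop body of A: for i in range(0, it), with single-char .capitalize() = upperChar on ASCII
def stepA (cs : List Char) (name : List Char) (i : Int) : List Char :=
  if i = 0 then name ++ [PySem.Chars.upperChar (PySem.List.pyGetD cs i ' ')]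
  else if i = 3 then name ++ [PySem.Chars.upperChar (PySem.List.pyGetD cs i ' ')]
  else name ++ [PySem.List.pyGetD cs i ' ']

def old_macDonald (val : String) : String :=
  let cs := val.toList
  let it : Int := (cs.length : Int)
  String.ofList ((PySem.List.pyRange 0 it 1).foldl (stepA cs) [])

-- ===== PORT B =====
-- loop body of B: for i in (0, 3): if i < len(chars): chars[i] = chars[i].capitalize()
def stepB (chars : List Char) (i : Nat) : List Char :=
  if i < chars.length then chars.set i (PySem.Chars.upperChar (chars.getD i ' ')) else chars

def old_macDonald_alt (val : String) : String :=
  String.ofList (([0, 3] : List Nat).foldl stepB val.toList)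

-- ===== PRECONDITION & SPEC =====
def Spec_old_macDonald (val : String) (out : String) : Prop := out = old_macDonald_alt val
instance (val : String) (out : String) : Decidable (Spec_old_macDonald val out) := by unfold Spec_old_macDonald; infer_instance

-- ===== CLAIM (what is proved, stated in full; the proofs are below) =====
def Claim_equal_old_macDonald : Prop := ∀ (val : String), Dom_old_macDonald val → Spec_old_macDonald val (old_macDonald val)

-- ===== LEMMAS AND PROOFS =====

-- indices ≥ 4 of A's loop just copy the character
theorem tail_fold (cs : List Char) (m : Nat) (hm : 4 ≤ m) (acc : List Char) :
    (PySem.List.pyRange (m : Int) (cs.length : Int) 1).foldl (stepA cs) acc = acc ++ cs.drop m := by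
  have h1 : (PySem.List.pyRange (m : Int) (cs.length : Int) 1).foldl (stepA cs) acc
      = (PySem.List.pyRange (m : Int) (cs.length : Int) 1).foldl
          (fun acc j => acc ++ [PySem.List.pyGetD cs j ' ']) acc := by
    apply PySem.List.foldl_congr_mem
    intro a x hx
    rw [PySem.List.mem_pyRange_one] at hx
    have hx0 : x ≠ 0 := by omega
    have hx3 : x ≠ 3 := by omega
    simp [stepA, hx0, hx3]
  rw [h1, PySem.List.foldl_pyRange_pyGetD' cs ' ' (fun a c => a ++ [c]) acc (by positivity),
    PySem.List.foldl_append_singleton_eq_self]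
  simp

theorem core_eq (cs : List Char) :
    (PySem.List.pyRange 0 (cs.length : Int) 1).foldl (stepA cs) [] = ([0, 3] : List Nat).foldl stepB cs := by
  match cs with
  | [] => rfl
  | [a] => simp [stepA, stepB, PySem.List.pyRange_one, List.range_succ, PySem.List.pyGetD, PySem.List.pyGet?, PySem.List.pyIdx?]
  | [a, b] => simp [stepA, stepB, PySem.List.pyRange_one, List.range_succ, PySem.List.pyGetD, PySem.List.pyGet?, PySem.List.pyIdx?]
  | [a, b, c] => simp [stepA, stepB, PySem.List.pyRange_one, List.range_succ, PySem.List.pyGetD, PySem.List.pyGet?, PySem.List.pyIdx?]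
  | a :: b :: c :: d :: rest =>
    have hlen : ((a :: b :: c :: d :: rest).length : Int) = 4 + rest.length := by simp; omega
    have hsplit : PySem.List.pyRange 0 ((a :: b :: c :: d :: rest).length : Int) 1
        = PySem.List.pyRange 0 4 1 ++ PySem.List.pyRange 4 ((a :: b :: c :: d :: rest).length : Int) 1 := by
      apply PySem.List.pyRange_one_append 0 4 _ (by omega) (by rw [hlen]; omega)
    rw [hsplit, List.foldl_append]
    have h4 : PySem.List.pyRange 0 4 1 = [0, 1, 2, 3] := by decide
    rw [h4]
    have htail := tail_fold (a :: b :: c :: d :: rest) 4 (le_refl 4)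
      ([0, 1, 2, 3].foldl (stepA (a :: b :: c :: d :: rest)) [])
    push_cast at htail ⊢
    rw [htail]
    simp [stepA, stepB, PySem.List.pyGetD, PySem.List.pyGet?, PySem.List.pyIdx?]
    refine ⟨?_, ?_, ?_, ?_⟩ <;> rw [if_pos (by omega)] <;> simp

theorem old_macDonald_spec : Claim_equal_old_macDonald := by
  intro val _
  unfold Spec_old_macDonald old_macDonald old_macDonald_alt
  simp only []
  rw [core_eq]
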